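-- pv_equiv track=rewrite | github.com/devin-gaughan/Code-Projects | OSU/WINT2025/ENGR102/Week 5 Exploration Flowcharts and Pseudocode.py | num_get
-- ===== SOURCE A (Python) =====
-- def num_get(y):
--     num = y
--     while num < 10:
--         if num % 2 == 0:
--             num = num + 1
--         else:
--             num = num + 1
--     return num
-- ===== SOURCE B (Python) =====
-- def num_get(y):
--     return y if y >= 10 else 10
-- ===== Notes on version B (the rewrite author's own statement) =====
-- stated objective: simpler
-- what changed: Replaced the one-step increment loop with a closed-form conditional: integers below 10 go straight to 10, others are returned unchanged.
import Mathlib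
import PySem

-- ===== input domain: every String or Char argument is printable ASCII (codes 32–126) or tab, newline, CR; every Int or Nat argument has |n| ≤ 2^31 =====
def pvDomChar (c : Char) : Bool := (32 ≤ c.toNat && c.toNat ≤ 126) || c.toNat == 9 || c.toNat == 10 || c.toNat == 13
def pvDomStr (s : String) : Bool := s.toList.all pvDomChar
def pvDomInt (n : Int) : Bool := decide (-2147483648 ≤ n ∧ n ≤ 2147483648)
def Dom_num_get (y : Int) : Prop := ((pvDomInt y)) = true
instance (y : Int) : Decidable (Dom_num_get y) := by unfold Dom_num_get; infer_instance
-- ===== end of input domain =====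

-- B replaces A's one-by-one increment loop with a closed-form conditional (simpler, O(1)).
-- ===== PORT A =====
def numGetLoop (num : Int) : Int :=
  if num < 10 then numGetLoop (num + 1) else num
termination_by (10 - num).toNat
decreasing_by omega

def num_get (y : Int) : Int := numGetLoop y

-- ===== PORT B =====
def num_get_alt (y : Int) : Int := if y ≥ 10 then y else 10

-- ===== PRECONDITION & SPEC =====
def Spec_num_get (y : Int) (out : Int) : Prop := out = num_get_alt y
instance (y : Int) (out : Int) : Decidable (Spec_num_get y out) := by unfold Spec_num_get; infer_instance

-- ===== CLAIM (what is proved, stated in full; the proofs are below) =====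
def Claim_equal_num_get : Prop := ∀ (y : Int), Dom_num_get y → Spec_num_get y (num_get y)

-- ===== LEMMAS AND PROOFS =====
theorem numGetLoop_eq (num : Int) : numGetLoop num = if num ≥ 10 then num else 10 := by
  fun_induction numGetLoop num with
  | case1 n h ih => rw [ih]; split <;> split <;> omega
  | case2 n h => split <;> omega

-- ===== VERDICT (by name: the statement is the Claim_ definition above) =====
theorem num_get_spec : Claim_equal_num_get := by
  intro y _
  unfold Spec_num_get num_get num_get_alt
  exact numGetLoop_eq y
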